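-- pv_equiv track=rewrite | github.com/judithvdw/AOC2024 | 09.py | defragment
-- ===== SOURCE A (Python) =====
-- def defragment(filesystem):
--     curr = 0
--     while None in filesystem:
--         last_item = filesystem.pop()
--         if last_item is not None:
--             next_none = filesystem.index(None, curr)
--             filesystem[next_none] = last_item
--             curr = next_none
--     return filesystem
-- ===== SOURCE B (Python) =====
-- def defragment(filesystem):
--     # One left-to-right pass: keep the first len(items) slots, filling each
--     # gap (None) with the next unused item taken from the right end.
--     items = [x for x in filesystem if x is not None]
--     rev = items[::-1]
--     out = []
--     j = 0
--     for x in filesystem[:len(items)]: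
--         if x is None:
--             out.append(rev[j])
--             j += 1
--         else:
--             out.append(x)
--     return out
-- ===== Notes on version B (the rewrite author's own statement) =====
-- stated objective: faster
-- what changed: Replaces A's destructive pop/index loop (rescanning the list for None each iteration) with a single left-to-right pass over the first len(items) slots, filling gaps from a precomputed reversed list of items.
import Mathlib
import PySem

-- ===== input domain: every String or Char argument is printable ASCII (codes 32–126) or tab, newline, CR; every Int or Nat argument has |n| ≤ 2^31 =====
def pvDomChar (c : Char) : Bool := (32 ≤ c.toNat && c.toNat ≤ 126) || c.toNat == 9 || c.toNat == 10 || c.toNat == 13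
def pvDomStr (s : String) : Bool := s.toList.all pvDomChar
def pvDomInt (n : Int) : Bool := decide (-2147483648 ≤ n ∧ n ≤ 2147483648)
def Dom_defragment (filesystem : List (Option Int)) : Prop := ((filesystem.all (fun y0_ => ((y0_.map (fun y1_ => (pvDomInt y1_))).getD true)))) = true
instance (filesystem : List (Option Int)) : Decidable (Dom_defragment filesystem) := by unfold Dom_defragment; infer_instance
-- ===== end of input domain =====

-- B replaces A's quadratic pop/index loop by one linear left-to-right gap-filling pass
-- (objective: faster). Note: Python A mutates its argument in place; the equivalence
-- proved here is about the RETURN value only.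

-- ===== PORT A =====
-- the while-loop of A: pops the last element; a non-None popped element is moved
-- into the first None slot at index ≥ curr (filesystem.index(None, curr), ported by
-- hand as index? on (dropLast fs).drop curr shifted by curr — exact for 0 ≤ curr).
def defragLoop (fs : List (Option Int)) (curr : Nat) : List (Option Int) :=
  if none ∈ fs then
    let fs1 := fs.dropLast
    match fs.getLast? with
    | Option.none => fs            -- unreachable: the guard implies fs ≠ []
    | some Option.none => defragLoop fs1 curr
    | some (some v) =>
      match PySem.List.index? (fs1.drop curr) Option.none with
      | Option.none => fs1         -- unreachable: ValueError in Python
      | some d => defragLoop (fs1.set (curr + d) (some v)) (curr + d)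
  else fs
termination_by fs.length
decreasing_by
  all_goals
    have hne : fs ≠ [] := by rintro rfl; simp_all
    have h0 : 0 < fs.length := List.length_pos_iff.mpr hne
    simp only [List.length_set, List.length_dropLast]
    omega

def defragment (filesystem : List (Option Int)) : List (Option Int) :=
  defragLoop filesystem 0

-- ===== PORT B =====
-- the for-loop of B: walk the first len(items) slots, copy non-None entries,
-- fill each None from the reversed item list (consumed front-to-back, = rev[j], j += 1).
def fillGaps : List (Option Int) → List Int → List (Option Int)
  | [], _ => []
  | Option.none :: rest, r :: rs => some r :: fillGaps rest rs
  | Option.none :: _, [] => []     -- unreachable: IndexError in Python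
  | some v :: rest, rs => some v :: fillGaps rest rs

def defragment_alt (filesystem : List (Option Int)) : List (Option Int) :=
  let items := filesystem.filterMap id
  fillGaps (filesystem.take items.length) items.reverse

-- ===== PRECONDITION & SPEC =====
def Spec_defragment (filesystem : List (Option Int)) (out : List (Option Int)) : Prop := out = defragment_alt filesystem
instance (filesystem : List (Option Int)) (out : List (Option Int)) : Decidable (Spec_defragment filesystem out) := by unfold Spec_defragment; infer_instance

-- ===== CLAIM (what is proved, stated in full; the proofs are below) =====
def Claim_equal_defragment : Prop := ∀ (filesystem : List (Option Int)), Dom_defragment filesystem → Spec_defragment filesystem (defragment filesystem)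

-- ===== LEMMAS AND PROOFS =====

-- fillGaps passes a None-free prefix through unchanged
theorem fillGaps_append_clean (p l : List (Option Int)) (r : List Int)
    (hp : ∀ x ∈ p, x ≠ Option.none) : fillGaps (p ++ l) r = p ++ fillGaps l r := by
  induction p with
  | nil => simp
  | cons a p ih =>
    match a with
    | Option.none => exact absurd rfl (hp Option.none (by simp))
    | some v => simp [fillGaps, ih (fun x hx => hp x (by simp [hx]))]

-- fillGaps only looks at the first (count of Nones) fillers
theorem fillGaps_congr (l : List (Option Int)) (r r' : List Int)
    (h : r.take (l.count Option.none) = r'.take (l.count Option.none)) :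
    fillGaps l r = fillGaps l r' := by
  induction l generalizing r r' with
  | nil => simp [fillGaps]
  | cons a l ih =>
    match a with
    | Option.none =>
      have hc : (Option.none :: l).count (Option.none : Option Int) = l.count Option.none + 1 := by
        simp
      rw [hc] at h
      match r, r' with
      | [], [] => rfl
      | [], _ :: _ => simp at h
      | _ :: _, [] => simp at h
      | b :: rs, b' :: rs' =>
        simp only [List.take_succ_cons, List.cons.injEq] at h
        simp [fillGaps, h.1, ih rs rs' h.2]
    | some v =>
      have hc : (some v :: l).count (Option.none : Option Int) = l.count Option.none := by
        simp
      rw [hc] at h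
      simp [fillGaps, ih r r' h]

-- with no None at all, B is the identity
theorem alt_of_no_none (fs : List (Option Int)) (h : Option.none ∉ fs) :
    defragment_alt fs = fs := by
  have hlen : (fs.filterMap id).length = fs.length := by
    simp
    intro a ha
    exact Option.isSome_iff_ne_none.mpr (fun he => h (he ▸ ha))
  have hcl : ∀ x ∈ fs, x ≠ Option.none := fun x hx he => h (he ▸ hx)
  simp only [defragment_alt, hlen, List.take_length]
  have := fillGaps_append_clean fs [] (fs.filterMap id).reverse hcl
  simpa [fillGaps] using this

-- dropping a trailing None does not change B
theorem alt_drop_none (fs1 : List (Option Int)) :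
    defragment_alt (fs1 ++ [Option.none]) = defragment_alt fs1 := by
  have hit : (fs1 ++ [Option.none]).filterMap id = fs1.filterMap id := by simp
  have hk : (fs1.filterMap id).length ≤ fs1.length := fs1.length_filterMap_le id
  simp only [defragment_alt, hit, List.take_append_of_le_length hk]

-- moving the trailing item into the first gap does not change B
theorem alt_move (P Q : List (Option Int)) (v : Int)
    (hP : ∀ x ∈ P, x ≠ Option.none) :
    defragment_alt (P ++ some v :: Q) = defragment_alt (P ++ Option.none :: Q ++ [some v]) := by
  classical
  -- P is None-free, so its filterMap is a full-length list
  have hPlen : (P.filterMap id).length = P.length := by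
    simp
    intro a ha
    exact Option.isSome_iff_ne_none.mpr (hP a ha)
  set p := P.filterMap id with hp
  set itQ := Q.filterMap id with hitQ
  have hQlen : itQ.length ≤ Q.length := Q.length_filterMap_le id
  -- items on each side
  have hL : (P ++ some v :: Q).filterMap id = p ++ v :: itQ := by simp [hp, hitQ]
  have hR : (P ++ Option.none :: Q ++ [some v]).filterMap id = p ++ itQ ++ [v] := by
    simp [hp, hitQ]
  have hkL : (p ++ v :: itQ).length = P.length + (itQ.length + 1) := by
    simp [hPlen]
  have hkR : (p ++ itQ ++ [v]).length = P.length + (itQ.length + 1) := by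
    simp [hPlen]
  -- the kept prefixes
  have htakeL : (P ++ some v :: Q).take (P.length + (itQ.length + 1))
      = P ++ some v :: Q.take itQ.length := by
    rw [List.take_append]
    simp
  have htakeR : (P ++ Option.none :: Q ++ [some v]).take (P.length + (itQ.length + 1))
      = P ++ Option.none :: Q.take itQ.length := by
    have h0 : P.length + (itQ.length + 1) - (P.length + (Q.length + 1)) = 0 := by omega
    have h1 : P.length ≤ P.length + (itQ.length + 1) := by omega
    rw [List.take_append]
    simp [List.take_append, h0, List.take_of_length_le h1]
  -- count of gaps in the shared tail is at most |itQ|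
  have hcount : (Q.take itQ.length).count (Option.none : Option Int) ≤ itQ.reverse.length := by
    calc (Q.take itQ.length).count (Option.none : Option Int)
        ≤ (Q.take itQ.length).length := List.count_le_length
      _ ≤ itQ.length := List.length_take_le _ _
      _ = itQ.reverse.length := by simp
  simp only [defragment_alt, hL, hR, hkL, hkR, htakeL, htakeR]
  rw [fillGaps_append_clean P _ _ hP, fillGaps_append_clean P _ _ hP]
  have hrevL : (p ++ v :: itQ).reverse = itQ.reverse ++ v :: p.reverse := by simp
  have hrevR : (p ++ itQ ++ [v]).reverse = v :: (itQ.reverse ++ p.reverse) := by simp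
  rw [hrevL, hrevR]
  show P ++ fillGaps (some v :: Q.take itQ.length) (itQ.reverse ++ v :: p.reverse)
      = P ++ fillGaps (Option.none :: Q.take itQ.length) (v :: (itQ.reverse ++ p.reverse))
  simp only [fillGaps, List.append_cancel_left_eq, List.cons.injEq, true_and]
  exact fillGaps_congr _ _ _ (by
    rw [List.take_append_of_le_length hcount, List.take_append_of_le_length hcount])

-- the loop invariant: no None strictly before curr; then the loop computes B
theorem defragLoop_eq_alt (n : Nat) (fs : List (Option Int)) (curr : Nat)
    (hn : fs.length ≤ n) (hinv : ∀ x ∈ fs.take curr, x ≠ Option.none) :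
    defragLoop fs curr = defragment_alt fs := by
  induction n generalizing fs curr with
  | zero =>
    have : fs = [] := List.eq_nil_of_length_eq_zero (Nat.le_zero.mp hn)
    subst this
    rw [defragLoop]
    simp [alt_of_no_none [] (by simp)]
  | succ n ih =>
    rw [defragLoop]
    by_cases hmem : (Option.none : Option Int) ∈ fs
    · simp only [hmem, if_true]
      have hne : fs ≠ [] := by rintro rfl; simp at hmem
      obtain ⟨a, ha⟩ := List.getLast?_isSome.mpr hne |> Option.isSome_iff_exists.mp
      obtain ⟨fs1', hfs1'⟩ := List.getLast?_eq_some_iff.mp ha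
      have hdrop : fs.dropLast = fs1' := by rw [hfs1']; simp
      have hlen1 : fs1'.length + 1 = fs.length := by rw [hfs1']; simp
      -- invariant transfers to the popped list
      have hinv1 : ∀ x ∈ fs1'.take curr, x ≠ Option.none := by
        intro x hx
        apply hinv
        rw [hfs1', List.take_append]
        exact List.mem_append_left _ hx
      rw [ha]
      match a with
      | Option.none =>
        rw [hdrop, ih fs1' curr (by omega) hinv1, hfs1']
        exact (alt_drop_none fs1').symm
      | some v =>
        -- None is still in fs1', and (by the invariant) at an index ≥ curr
        have hmem1 : (Option.none : Option Int) ∈ fs1' := by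
          rw [hfs1'] at hmem
          rcases List.mem_append.mp hmem with h | h
          · exact h
          · simp at h
        have hmemdrop : (Option.none : Option Int) ∈ fs1'.drop curr := by
          rcases List.mem_append.mp ((List.take_append_drop curr fs1') ▸ hmem1) with h | h
          · exact absurd rfl (hinv1 _ h)
          · exact h
        obtain ⟨d, hd⟩ := Option.isSome_iff_exists.mp
          ((PySem.List.index?_isSome_iff _ _).mpr hmemdrop)
        obtain ⟨pre, suf, hdecomp, hprelen, hprenone⟩ :=
          (PySem.List.index?_eq_some_iff _ _ _).mp hd
        have hcurrle : curr ≤ fs1'.length := by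
          by_contra hc
          rw [List.drop_of_length_le (by omega)] at hmemdrop
          simp at hmemdrop
        set P : List (Option Int) := fs1'.take curr ++ pre with hPdef
        have hfs1dec : fs1' = P ++ Option.none :: suf := by
          rw [hPdef, List.append_assoc, ← hdecomp, List.take_append_drop]
        have hPlen : P.length = curr + d := by
          rw [hPdef]; simp [hprelen, Nat.min_eq_left hcurrle]
        have hPclean : ∀ x ∈ P, x ≠ Option.none := by
          intro x hx
          rcases List.mem_append.mp (hPdef ▸ hx) with h | h
          · exact hinv1 x h
          · rintro rfl; exact hprenone h
        have hset : fs1'.set (curr + d) (some v) = P ++ some v :: suf := by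
          rw [hfs1dec, ← hPlen, List.set_append_right _ _ (le_refl _)]
          simp
        rw [hdrop, hd]
        show defragLoop (fs1'.set (curr + d) (some v)) (curr + d) = defragment_alt fs
        rw [hset]
        have hinv2 : ∀ x ∈ (P ++ some v :: suf).take (curr + d), x ≠ Option.none := by
          intro x hx
          apply hPclean
          rw [← hPlen, List.take_append_of_le_length (le_refl _)] at hx
          exact List.mem_of_mem_take hx
        rw [ih (P ++ some v :: suf) (curr + d) (by rw [← hset]; simp; omega) hinv2]
        rw [alt_move P suf v hPclean, hfs1', hfs1dec]
    · simp only [hmem, if_false]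
      exact (alt_of_no_none fs hmem).symm

-- ===== VERDICT (by name: the statement is the Claim_ definition above) =====
theorem defragment_spec : Claim_equal_defragment := by
  intro fs _
  unfold Spec_defragment defragment
  exact defragLoop_eq_alt fs.length fs 0 (le_refl _) (by simp)
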